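-- pv_equiv track=rewrite | github.com/NinaTrif/Genome_Informatics_Project | burrows_wheeler_transform.py | rank_bwt
-- ===== SOURCE A (Python) =====
-- def rank_bwt(bw):
--     """ Given BWT string bw, return parallel list of B-ranks.  Also
--         returns freq: map from character to # times it appears. """
--     freq = dict()
--     ranks = []
--     for c in bw:
--         if c not in freq:
--             freq[c] = 0
--         ranks.append(freq[c])
--         freq[c] += 1
--     return ranks, freq
-- ===== SOURCE B (Python) =====
-- def rank_bwt(bw):
--     """Index-table version: group positions by character, then scatter ranks."""
--     positions = {}
--     for i, c in enumerate(bw):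
--         positions.setdefault(c, []).append(i)
--     ranks = [0] * len(bw)
--     freq = {}
--     for c, pos in positions.items():
--         for j, p in enumerate(pos):
--             ranks[p] = j
--         freq[c] = len(pos)
--     return ranks, freq
-- ===== Notes on version B (the rewrite author's own statement) =====
-- stated objective: alternative
-- what changed: Replaces the single running-count pass (dict of counts updated per character) by a two-phase plan: first build an index table mapping each character to the list of positions where it occurs, then scatter each position's rank into a preallocated list and read each character's frequency off as the length of its position list.
import Mathlib
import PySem

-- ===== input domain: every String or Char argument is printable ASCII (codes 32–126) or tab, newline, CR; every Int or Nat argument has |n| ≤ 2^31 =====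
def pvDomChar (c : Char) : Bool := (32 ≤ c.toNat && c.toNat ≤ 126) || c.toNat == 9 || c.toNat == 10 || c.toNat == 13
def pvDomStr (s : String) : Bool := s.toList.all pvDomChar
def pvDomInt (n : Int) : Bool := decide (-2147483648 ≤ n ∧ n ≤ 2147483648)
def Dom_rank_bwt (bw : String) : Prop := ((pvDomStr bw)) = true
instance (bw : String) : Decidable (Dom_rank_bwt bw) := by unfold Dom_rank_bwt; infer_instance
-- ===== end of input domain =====

-- B replaces A's single running-count pass by an index-table build (positions per character)
-- followed by a scatter pass writing each rank; an alternative O(n) decomposition, not claimed faster.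

-- ===== PORT A =====
-- A: one pass; freq is a running dict of counts, ranks appends the count seen so far.
def rank_bwt (bw : String) : List Int × (List (String × Int)) :=
  let res := bw.toList.foldl
    (fun (st : List Int × PySem.Dict String Int) (c : Char) =>
      let freq := if st.2.contains (String.singleton c) then st.2
                  else st.2.insert (String.singleton c) 0   -- if c not in freq: freq[c] = 0
      let r := freq.getD (String.singleton c) 0             -- ranks.append(freq[c])  (key present)
      (st.1 ++ [r], freq.insert (String.singleton c) (r + 1)))  -- freq[c] += 1
    ([], PySem.Dict.empty)
  (res.1, res.2.items)

-- ===== PORT B =====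
-- B: positions[c] = list of indices of c (setdefault/append = Dict.modify with [] default);
-- then scatter ranks[p] = j over each position list and read freq[c] = len(positions[c]).
-- positions indices come from enumerate, so they are ≥ 0 and < len(bw): `.toNat` on them
-- and `List.set` are exact for Python's `ranks[p] = j` here.
def rank_bwt_alt (bw : String) : List Int × (List (String × Int)) :=
  let L := bw.toList
  let positions := (PySem.List.enumerate L).foldl
    (fun (d : PySem.Dict String (List Int)) ic =>
      d.modify (String.singleton ic.2) [] (fun ps => ps ++ [ic.1]))
    PySem.Dict.empty
  let res := positions.items.foldl
    (fun (st : List Int × PySem.Dict String Int) kp =>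
      ((PySem.List.enumerate kp.2).foldl (fun rs jp => rs.set jp.2.toNat jp.1) st.1,
       st.2.insert kp.1 (kp.2.length : Int)))
    (List.replicate L.length 0, PySem.Dict.empty)
  (res.1, res.2.items)

-- ===== PRECONDITION & SPEC =====
def Spec_rank_bwt (bw : String) (out : List Int × (List (String × Int))) : Prop := out = rank_bwt_alt bw
instance (bw : String) (out : List Int × (List (String × Int))) : Decidable (Spec_rank_bwt bw out) := by unfold Spec_rank_bwt; infer_instance

-- ===== CLAIM (what is proved, stated in full; the proofs are below) =====
def Claim_equal_rank_bwt : Prop := ∀ (bw : String), Dom_rank_bwt bw → Spec_rank_bwt bw (rank_bwt bw)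

-- ===== LEMMAS AND PROOFS =====

theorem pvKey_inj : Function.Injective String.singleton := by
  intro a b h; simpa using congrArg String.toList h

-- A's loop, rank component spec: rank of position i = count of its char in the prefix before it.
def pvRanksSpec (p L : List Char) : List Int :=
  match L with
  | [] => []
  | c :: t => (p.count c : Int) :: pvRanksSpec (p ++ [c]) t

-- positions of c in L, as Python ints, offset s (= the filtered first components of enumerate(L, s))
def pvOcc (L : List Char) (c : Char) (s : Int) : List Int :=
  ((PySem.List.enumerate L s).filter (fun ic => ic.2 == c)).map (·.1)

-- the scatter loop of B, with the enumerate counter started at j0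
def pvScatFrom (rs : List Int) (pos : List Int) (j0 : Int) : List Int :=
  (PySem.List.enumerate pos j0).foldl (fun rs jp => rs.set jp.2.toNat jp.1) rs

theorem pvEnumerate_cons {α : Type} (a : α) (t : List α) (s : Int) :
    PySem.List.enumerate (a :: t) s = (s, a) :: PySem.List.enumerate t (s + 1) := rfl

theorem pvRanksSpec_getElem? (L : List Char) : ∀ (p : List Char) (i : ℕ),
    (pvRanksSpec p L)[i]? = (L[i]?).map (fun c => (((p ++ L.take i).count c : ℕ) : Int)) := by
  induction L with
  | nil => intro p i; simp [pvRanksSpec]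
  | cons c t ih =>
    intro p i
    cases i with
    | zero => simp [pvRanksSpec]
    | succ i =>
      simp only [pvRanksSpec, List.getElem?_cons_succ, List.take_succ_cons]
      rw [ih]
      simp [List.append_assoc]

theorem pvScatFrom_cons (rs : List Int) (p : Int) (pos : List Int) (j0 : Int) :
    pvScatFrom rs (p :: pos) j0 = pvScatFrom (rs.set p.toNat j0) pos (j0 + 1) := rfl

theorem pvScatFrom_length (pos : List Int) : ∀ (rs : List Int) (j0 : Int),
    (pvScatFrom rs pos j0).length = rs.length := by
  induction pos with
  | nil => intro rs j0; rfl
  | cons p t ih => intro rs j0; rw [pvScatFrom_cons, ih]; simp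

theorem pvOcc_cons (a : Char) (t : List Char) (c : Char) (s : Int) :
    pvOcc (a :: t) c s = (if a = c then [s] else []) ++ pvOcc t c (s + 1) := by
  simp only [pvOcc, pvEnumerate_cons, List.filter_cons]
  by_cases h : a = c <;> simp [h]

theorem pvOcc_length (L : List Char) : ∀ (c : Char) (s : Int),
    (pvOcc L c s).length = L.count c := by
  induction L with
  | nil => intro c s; rfl
  | cons a t ih =>
    intro c s
    rw [pvOcc_cons]
    by_cases h : a = c <;> simp [h, ih]

theorem pvOcc_lb (L : List Char) : ∀ (c : Char) (s : Int) (p : Int), p ∈ pvOcc L c s → s ≤ p := by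
  induction L with
  | nil => intro c s p h; simp [pvOcc] at h
  | cons a t ih =>
    intro c s p h
    rw [pvOcc_cons] at h
    rcases List.mem_append.mp h with h1 | h2
    · by_cases hac : a = c <;> simp [hac] at h1; omega
    · have := ih c (s+1) p h2; omega

theorem pvOcc_mem (L : List Char) : ∀ (c : Char) (s : Int) (p : Int), p ∈ pvOcc L c s →
    ∃ k : ℕ, p = s + k ∧ L[k]? = some c := by
  induction L with
  | nil => intro c s p h; simp [pvOcc] at h
  | cons a t ih =>
    intro c s p h
    rw [pvOcc_cons] at h
    rcases List.mem_append.mp h with h1 | h2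
    · by_cases hac : a = c <;> simp [hac] at h1
      exact ⟨0, by simp [h1, hac]⟩
    · obtain ⟨k, hk, hget⟩ := ih c (s+1) p h2
      exact ⟨k + 1, by push_cast; omega, by simpa using hget⟩

theorem pvOcc_nodup (L : List Char) (c : Char) (s : Int) : (pvOcc L c s).Nodup := by
  induction L generalizing s with
  | nil => simp [pvOcc]
  | cons a t ih =>
    rw [pvOcc_cons]
    by_cases h : a = c
    · simp only [h]
      refine List.Nodup.append (by simp) (ih (s+1)) ?_
      intro x hx hy
      have := pvOcc_lb t c (s+1) x hy
      simp at hx; omega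
    · simpa [h] using ih (s+1)

theorem pvOcc_complete_idx (L : List Char) : ∀ (c : Char) (s : Int) (i : ℕ), L[i]? = some c →
    (pvOcc L c s)[(L.take i).count c]? = some (s + i) := by
  induction L with
  | nil => intro c s i h; simp at h
  | cons a t ih =>
    intro c s i h
    rw [pvOcc_cons]
    cases i with
    | zero =>
      simp at h
      simp [h]
    | succ i =>
      simp only [List.getElem?_cons_succ] at h
      have := ih c (s+1) i h
      by_cases hac : a = c
      · subst hac
        simp only [List.take_succ_cons, List.count_cons_self]
        rw [List.getElem?_append_right (by simp)]
        simpa [add_assoc, add_comm 1 (i:Int)] using this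
      · simp only [List.take_succ_cons, if_neg hac, List.nil_append]
        rw [List.count_cons_of_ne (by exact fun hc => hac hc)]
        simpa [add_assoc, add_comm 1 (i:Int)] using this

theorem pvScatFrom_get_not (pos : List Int) : ∀ (rs : List Int) (j0 : Int) (i : ℕ),
    (∀ p ∈ pos, p.toNat ≠ i) → (pvScatFrom rs pos j0)[i]? = rs[i]? := by
  induction pos with
  | nil => intro rs j0 i _; rfl
  | cons p t ih =>
    intro rs j0 i h
    rw [pvScatFrom_cons, ih _ _ _ (fun q hq => h q (List.mem_cons_of_mem _ hq)),
      List.getElem?_set_ne (h p List.mem_cons_self)]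

theorem pvScatFrom_get_mem (pos : List Int) : ∀ (rs : List Int) (j0 : Int) (i j : ℕ),
    pos.Nodup → (∀ p ∈ pos, 0 ≤ p) → pos[j]? = some (i : Int) → i < rs.length →
    (pvScatFrom rs pos j0)[i]? = some (j0 + j) := by
  induction pos with
  | nil => intro rs j0 i j _ _ hj _; simp at hj
  | cons p t ih =>
    intro rs j0 i j hnd h0 hj hi
    rw [pvScatFrom_cons]
    cases j with
    | zero =>
      simp only [List.getElem?_cons_zero, Option.some.injEq] at hj
      subst hj
      have hnotin : ∀ q ∈ t, q.toNat ≠ i := by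
        intro q hq hqi
        have h0q : 0 ≤ q := h0 q (List.mem_cons_of_mem _ hq)
        have : q = (i : Int) := by omega
        exact (List.nodup_cons.mp hnd).1 (this ▸ hq)
      rw [pvScatFrom_get_not t _ _ _ hnotin]
      have : ((i : Int)).toNat = i := by omega
      rw [this, List.getElem?_set_self hi]
      simp
    | succ j =>
      simp only [List.getElem?_cons_succ] at hj
      have : p.toNat ≠ i := by
        intro hpi
        have h0p : 0 ≤ p := h0 p List.mem_cons_self
        have hpe : p = (i : Int) := by omega
        have : (i : Int) ∈ t := List.mem_of_getElem? hj
        exact (List.nodup_cons.mp hnd).1 (hpe ▸ this)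
      have := ih (rs.set p.toNat j0) (j0 + 1) i j (List.nodup_cons.mp hnd).2
        (fun q hq => h0 q (List.mem_cons_of_mem _ hq)) hj (by simpa using hi)
      rw [this]; congr 1; omega

-- the outer scatter fold of B, over a dedup list of characters
theorem pvOuter_get (L : List Char) (i : ℕ) (c : Char) (hL : L[i]? = some c) :
    ∀ (cs : List Char), cs.Nodup → ∀ (rs : List Int), i < rs.length →
    (cs.foldl (fun rs c' => pvScatFrom rs (pvOcc L c' 0) 0) rs)[i]? =
      if c ∈ cs then some (((L.take i).count c : ℕ) : Int) else rs[i]? := by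
  intro cs
  induction cs with
  | nil => intro _ rs _; simp
  | cons c' t ih =>
    intro hnd rs hi
    rw [List.foldl_cons]
    have hlen : i < (pvScatFrom rs (pvOcc L c' 0) 0).length := by rw [pvScatFrom_length]; exact hi
    by_cases hc : c' = c
    · subst hc
      have hnotmem : c' ∉ t := (List.nodup_cons.mp hnd).1
      rw [ih (List.nodup_cons.mp hnd).2 _ hlen]
      rw [if_neg hnotmem, if_pos (List.mem_cons_self)]
      have hocc := pvOcc_complete_idx L c' 0 i hL
      rw [pvScatFrom_get_mem (pvOcc L c' 0) rs 0 i ((L.take i).count c')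
        (pvOcc_nodup L c' 0) (fun p hp => pvOcc_lb L c' 0 p hp)
        (by simpa using hocc) hi]
      simp
    · have hnot : ∀ p ∈ pvOcc L c' 0, p.toNat ≠ i := by
        intro p hp hpi
        obtain ⟨k, hk, hget⟩ := pvOcc_mem L c' 0 p hp
        have h0 : 0 ≤ p := pvOcc_lb L c' 0 p hp
        have : k = i := by omega
        subst this
        rw [hL] at hget
        exact hc (by injection hget with h; exact h.symm) -- some c = some c'
      rw [ih (List.nodup_cons.mp hnd).2 _ hlen, pvScatFrom_get_not _ _ _ _ hnot]
      by_cases hmem : c ∈ t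
      · simp [hmem]
      · rw [if_neg hmem, if_neg (by intro h; rcases List.mem_cons.mp h with h1 | h2; exact hc h1.symm; exact hmem h2)]

theorem pvOuter_length (L : List Char) (cs : List Char) (rs : List Int) :
    (cs.foldl (fun rs c' => pvScatFrom rs (pvOcc L c' 0) 0) rs).length = rs.length := by
  induction cs generalizing rs with
  | nil => rfl
  | cons c t ih => rw [List.foldl_cons, ih, pvScatFrom_length]

-- injective image of a Python-set build
theorem pvOfList_map_gen (f : Char → String) (hf : Function.Injective f) (xs : List Char) :
    ∀ (s : PySem.Set Char), PySem.Set.update (s.map f) (xs.map f) = (PySem.Set.update s xs).map f := by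
  induction xs with
  | nil => intro s; rfl
  | cons x t ih =>
    intro s
    show PySem.Set.update (PySem.Set.add (s.map f) (f x)) (t.map f) = _
    have hadd : PySem.Set.add (s.map f) (f x) = (PySem.Set.add s x).map f := by
      unfold PySem.Set.add PySem.Set.contains
      have hcont : (List.map f s).contains (f x) = s.contains x := by
        by_cases h : x ∈ s
        · simp [h, List.mem_map]
          exact ⟨x, h, rfl⟩
        · simp [h, List.mem_map]
          intro y hy hxy
          exact absurd ((hf hxy) ▸ hy) h
      rw [hcont]
      by_cases h : x ∈ s <;> simp [h]
    rw [hadd, ih]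
    rfl

theorem pvOfList_map (f : Char → String) (hf : Function.Injective f) (xs : List Char) :
    PySem.Set.ofList (xs.map f) = (PySem.Set.ofList xs).map f :=
  pvOfList_map_gen f hf xs []

theorem pvEnumerate_map_key (L : List Char) : ∀ (s : Int),
    (PySem.List.enumerate L s).map (fun ic => String.singleton ic.2) = L.map String.singleton := by
  induction L with
  | nil => intro s; rfl
  | cons a t ih => intro s; simp [ih]

-- characterization of B's positions dict
theorem pvPositions_items (L : List Char) :
    ((PySem.List.enumerate L).foldl
      (fun (d : PySem.Dict String (List Int)) ic =>
        d.modify (String.singleton ic.2) [] (fun ps => ps ++ [ic.1]))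
      PySem.Dict.empty).items =
    (PySem.Set.ofList L).map (fun c => (String.singleton c, pvOcc L c 0)) := by
  have hkeys : ((PySem.List.enumerate L).foldl
      (fun (d : PySem.Dict String (List Int)) ic =>
        d.modify (String.singleton ic.2) [] (fun ps => ps ++ [ic.1]))
      PySem.Dict.empty).keys = (PySem.Set.ofList L).map String.singleton := by
    rw [PySem.Dict.keys_foldl_modify_key (PySem.List.enumerate L)
      (fun ic => String.singleton ic.2) [] (fun _ ic => fun ps => ps ++ [ic.1]) PySem.Dict.empty]
    rw [pvEnumerate_map_key, ← pvOfList_map _ pvKey_inj]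
    rfl
  have hnd : ((PySem.List.enumerate L).foldl
      (fun (d : PySem.Dict String (List Int)) ic =>
        d.modify (String.singleton ic.2) [] (fun ps => ps ++ [ic.1]))
      PySem.Dict.empty).keys.Nodup :=
    PySem.Dict.nodup_keys_foldl_modify_key _ _ _ _ _ (by simp [PySem.Dict.keys_empty])
  rw [PySem.Dict.items_eq_map_keys _ hnd [], hkeys, List.map_map]
  refine List.map_congr_left ?_
  intro c _
  simp only [Function.comp_apply]
  congr 1
  -- getD at (singleton c) = pvOcc L c 0
  have hfold : ((PySem.List.enumerate L).foldl
      (fun (d : PySem.Dict String (List Int)) ic =>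
        d.modify (String.singleton ic.2) [] (fun ps => ps ++ [ic.1]))
      PySem.Dict.empty)
    = (((PySem.List.enumerate L).map (fun ic => (String.singleton ic.2, ic.1))).foldl
      (fun (d : PySem.Dict String (List Int)) p => d.modify p.1 [] (fun ps => ps ++ [p.2]))
      PySem.Dict.empty) := by rw [List.foldl_map]
  rw [hfold, PySem.Dict.getD_foldl_modify_append]
  rw [PySem.Dict.getD_empty, List.nil_append]
  rw [List.filter_map, List.map_map]
  unfold pvOcc
  simp only [Function.comp_def]
  apply congrArg
  apply List.filter_congr
  intro ic _
  show (String.singleton ic.2 == String.singleton c) = (ic.2 == c)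
  by_cases h : ic.2 = c
  · simp [h]
  · have : String.singleton ic.2 ≠ String.singleton c := fun hs => h (pvKey_inj hs)
    simp [h, this]

-- A's loop, both components at once
theorem pvLoopA (L : List Char) : ∀ (p : List Char) (rs : List Int) (d : PySem.Dict String Int),
    (∀ c : Char, d.getD (String.singleton c) 0 = (p.count c : Int)) →
    L.foldl
      (fun (st : List Int × PySem.Dict String Int) (c : Char) =>
        let freq := if st.2.contains (String.singleton c) then st.2
                    else st.2.insert (String.singleton c) 0
        let r := freq.getD (String.singleton c) 0
        (st.1 ++ [r], freq.insert (String.singleton c) (r + 1)))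
      (rs, d)
    = (rs ++ pvRanksSpec p L,
       L.foldl (fun d c => d.insert (String.singleton c) (d.getD (String.singleton c) 0 + 1)) d) := by
  induction L with
  | nil => intro p rs d h; simp [pvRanksSpec]
  | cons c t ih =>
    intro p rs d h
    rw [List.foldl_cons, List.foldl_cons]
    have hstep : (let freq := if d.contains (String.singleton c) then d
                    else d.insert (String.singleton c) 0
                  let r := freq.getD (String.singleton c) 0
                  ((rs, d).1 ++ [r], freq.insert (String.singleton c) (r + 1)))
        = (rs ++ [((p.count c : ℕ) : Int)],
           d.insert (String.singleton c) (d.getD (String.singleton c) 0 + 1)) := by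
      by_cases hc : d.contains (String.singleton c)
      · simp [hc, h c]
      · simp only [Bool.not_eq_true] at hc
        simp only [hc]
        rw [if_neg (by simp)]
        rw [PySem.Dict.getD_insert_self, PySem.Dict.insert_insert_self,
          PySem.Dict.getD_of_not_contains d 0 hc, ← h c,
          PySem.Dict.getD_of_not_contains d 0 hc]
    rw [hstep]
    have hinv : ∀ c' : Char,
        (d.insert (String.singleton c) (d.getD (String.singleton c) 0 + 1)).getD (String.singleton c') 0
          = ((p ++ [c]).count c' : Int) := by
      intro c'
      rw [PySem.Dict.getD_insert]
      by_cases hcc : c' = c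
      · subst hcc
        rw [if_pos rfl, h c']
        simp [List.count_append]
      · rw [if_neg (fun hs => hcc (pvKey_inj hs)), h c']
        have h0 : List.count c' [c] = 0 := by
          rw [List.count_eq_zero]
          simp [hcc]
        rw [List.count_append, h0]
        simp
    rw [ih (p ++ [c]) _ _ hinv]
    simp [pvRanksSpec, h c]

-- splitting B's outer pair-state fold over the mapped items list
theorem pvSplit (L : List Char) (S : List Char) :
    ∀ (rs : List Int) (d : PySem.Dict String Int),
    (S.map (fun c => (String.singleton c, pvOcc L c 0))).foldl
      (fun (st : List Int × PySem.Dict String Int) kp =>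
        ((PySem.List.enumerate kp.2).foldl (fun rs jp => rs.set jp.2.toNat jp.1) st.1,
         st.2.insert kp.1 (kp.2.length : Int)))
      (rs, d)
    = (S.foldl (fun rs c => pvScatFrom rs (pvOcc L c 0) 0) rs,
       S.foldl (fun d c => d.insert (String.singleton c) ((pvOcc L c 0).length : Int)) d) := by
  induction S with
  | nil => intro rs d; rfl
  | cons c t ih => intro rs d; exact ih _ _

-- B's scatter result, elementwise
theorem pvRanksB (L : List Char) :
    (PySem.Set.ofList L).foldl (fun rs c => pvScatFrom rs (pvOcc L c 0) 0)
      (List.replicate L.length 0) = pvRanksSpec [] L := by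
  apply List.ext_getElem?
  intro i
  rw [pvRanksSpec_getElem?]
  cases hL : L[i]? with
  | some c =>
    obtain ⟨hi, -⟩ := List.getElem?_eq_some_iff.mp hL
    rw [pvOuter_get L i c hL (PySem.Set.ofList L) (PySem.Set.nodup_ofList L) _
      (by simpa using hi)]
    rw [if_pos ((PySem.Set.mem_ofList _ _).mpr (List.mem_of_getElem? hL))]
    simp
  | none =>
    have hlen : L.length ≤ i := List.getElem?_eq_none_iff.mp hL
    rw [List.getElem?_eq_none (by rw [pvOuter_length, List.length_replicate]; exact hlen)]
    simp

-- ===== VERDICT (by name: the statement is the Claim_ definition above) =====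
theorem rank_bwt_spec : Claim_equal_rank_bwt := by
  intro bw _
  show rank_bwt bw = rank_bwt_alt bw
  -- A's value
  have hA : rank_bwt bw = (pvRanksSpec [] bw.toList,
      (PySem.Dict.counter (bw.toList.map String.singleton)).items) := by
    simp only [rank_bwt]
    rw [pvLoopA bw.toList [] [] PySem.Dict.empty (by intro c; simp [PySem.Dict.getD_empty])]
    simp only [List.nil_append]
    show (pvRanksSpec [] bw.toList,
      (bw.toList.foldl
        (fun (d : PySem.Dict String Int) c => d.insert (String.singleton c) (d.getD (String.singleton c) 0 + 1))
        PySem.Dict.empty).items) = _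
    rw [show (bw.toList.foldl
        (fun (d : PySem.Dict String Int) c => d.insert (String.singleton c) (d.getD (String.singleton c) 0 + 1))
        PySem.Dict.empty)
      = ((bw.toList.map String.singleton).foldl (fun d x => d.insert x (d.getD x 0 + 1))
        PySem.Dict.empty) from by rw [List.foldl_map]]
    rw [PySem.Dict.foldl_insert_getD_add_one_eq_counter]
  -- B's value
  have hB : rank_bwt_alt bw = (pvRanksSpec [] bw.toList,
      ((PySem.Set.ofList bw.toList).foldl
        (fun d c => d.insert (String.singleton c) ((pvOcc bw.toList c 0).length : Int))
        PySem.Dict.empty).items) := by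
    simp only [rank_bwt_alt]
    rw [pvPositions_items, pvSplit, pvRanksB]
  rw [hA, hB]
  -- the freq components agree entrywise
  rw [PySem.Dict.items_counter, pvOfList_map _ pvKey_inj, List.map_map,
    PySem.Dict.items_foldl_insert_fresh (PySem.Set.ofList bw.toList) String.singleton _
      PySem.Dict.empty (by intro a _; exact PySem.Dict.contains_empty _)
      (List.Nodup.map pvKey_inj (PySem.Set.nodup_ofList bw.toList))]
  rw [show PySem.Dict.empty.items = ([] : List (String × Int)) from rfl, List.nil_append]
  refine congrArg _ (List.map_congr_left ?_)
  intro c _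
  simp only [Function.comp_apply]
  rw [List.count_map_of_injective _ _ pvKey_inj, pvOcc_length]
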